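-- pv_equiv track=rewrite | github.com/wink4u/Algorithm | 프로그래머스/파이썬/Lv1/공원 산책.py | solution
-- ===== SOURCE A (Python) =====
-- def solution(park, routes):
--     n = len(park)
--     m = len(park[0])
--
--     sx, sy = 0, 0
--
--     dx = [-1, 1, 0, 0]
--     dy = [0, 0, -1, 1]
--
--     move_d = {'N' : 0, 'S' : 1, 'W' : 2, 'E' : 3}
--
--     for i in range(len(park)):
--         flag = 0
--         for j in range(len(park[i])):
--             if park[i][j] == 'S':
--                 sx, sy = i, j
--                 flag = 1
--                 break
--
--         if flag == 1:
--             break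
--
--     for i in range(len(routes)):
--         move = routes[i].split()
--
--         time = int(move[1])
--
--         temp_x, temp_y = sx, sy
--         for j in range(time):
--             nx = sx + dx[move_d[move[0]]]
--             ny = sy + dy[move_d[move[0]]]
--
--             if 0 <= nx < n and 0 <= ny < m and park[nx][ny] != 'X':
--                 sx = nx
--                 sy = ny
--             else:
--                 sx = temp_x
--                 sy = temp_y
--                 break
--
--     return [sx, sy]
-- ===== SOURCE B (Python) =====
-- def solution(park, routes):
--     n, m = len(park), len(park[0])
--     x, y = next(((i, j) for i, row in enumerate(park)
--                  for j, c in enumerate(row) if c == 'S'), (0, 0))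
--     dirs = {'N': (-1, 0), 'S': (1, 0), 'W': (0, -1), 'E': (0, 1)}
--     for route in routes:
--         parts = route.split()
--         dx, dy = dirs[parts[0]]
--         t = int(parts[1])
--         ex, ey = x + dx * t, y + dy * t
--         if 0 < t and 0 <= ex < n and 0 <= ey < m and \
--            all(park[x + dx * k][y + dy * k] != 'X' for k in range(1, t + 1)):
--             x, y = ex, ey
--     return [x, y]
-- ===== Notes on version B (the rewrite author's own statement) =====
-- stated objective: simpler
-- what changed: B replaces A's cell-by-cell walk with revert state (temp_x/temp_y, break) by computing each route's destination in closed form (x+dx*t, y+dy*t), checking the endpoint bounds once and the obstacle-freedom of the whole path with a single all(...) over steps 1..t, and finds 'S' with one next(...) over a flattened enumerate instead of a flag/break double loop. …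
-- outside the precondition, e.g. on solution(['S'], ['Q 0']): A returns [0, 0], B raises KeyError; on solution(['SO', 'X'], ['E 1']): A returns [0, 1], B returns [0, 1]
import Mathlib
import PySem

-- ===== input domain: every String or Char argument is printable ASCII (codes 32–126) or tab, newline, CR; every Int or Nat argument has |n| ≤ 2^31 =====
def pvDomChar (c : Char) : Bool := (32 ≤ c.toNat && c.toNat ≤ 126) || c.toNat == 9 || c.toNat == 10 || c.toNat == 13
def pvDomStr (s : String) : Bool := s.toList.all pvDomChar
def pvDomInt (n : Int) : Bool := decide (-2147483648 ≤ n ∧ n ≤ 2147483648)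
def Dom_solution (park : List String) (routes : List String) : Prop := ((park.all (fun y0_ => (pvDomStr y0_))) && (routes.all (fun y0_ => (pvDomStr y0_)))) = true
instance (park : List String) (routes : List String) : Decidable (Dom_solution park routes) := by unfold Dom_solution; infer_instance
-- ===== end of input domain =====

-- B computes each route's destination in closed form and validates the whole path with one batch
-- check, instead of A's cell-by-cell walk with revert state; objective: simpler.


-- ===== PORT A =====
-- park[x][y] (both callers bounds-check first; on Pre_ inputs an out-of-range read never happens)
def pvCell (park : List String) (x y : Int) : Char :=
  (PySem.Str.pyGet? ((PySem.List.pyGet? park x).getD "") y).getD ' '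

-- A's inner row scan with flag/break: index of the first 'S' in the row
def pvFindRowA : List Char → Int → Option Int
  | [], _ => none
  | c :: cs, j => if c = 'S' then some j else pvFindRowA cs (j + 1)

-- A's outer flag/break loop over the rows
def pvFindSA : List String → Int → Int × Int
  | [], _ => (0, 0)
  | r :: rest, i =>
    match pvFindRowA r.toList 0 with
    | some j => (i, j)
    | none => pvFindSA rest (i + 1)

def pvDxA : List Int := [-1, 1, 0, 0]
def pvDyA : List Int := [0, 0, -1, 1]
def pvMoveD : PySem.Dict String Int := PySem.Dict.ofList [("N", 0), ("S", 1), ("W", 2), ("E", 3)]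

-- A's 'for j in range(time)' with break-and-revert to temp
def pvStepA (park : List String) (n m dxv dyv : Int) (temp : Int × Int) :
    Nat → Int × Int → Int × Int
  | 0, p => p
  | k + 1, p =>
    let nx := p.1 + dxv
    let ny := p.2 + dyv
    if 0 ≤ nx ∧ nx < n ∧ 0 ≤ ny ∧ ny < m ∧ pvCell park nx ny ≠ 'X' then
      pvStepA park n m dxv dyv temp k (nx, ny)
    else temp

def pvRouteA (park : List String) (n m : Int) (p : Int × Int) (route : String) : Int × Int :=
  let move := PySem.Str.split₀ route
  let time := (PySem.Int.ofStr? ((PySem.List.pyGet? move 1).getD "")).getD 0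
  let idx := (PySem.Dict.get? pvMoveD ((PySem.List.pyGet? move 0).getD "")).getD 0
  let dxv := (PySem.List.pyGet? pvDxA idx).getD 0
  let dyv := (PySem.List.pyGet? pvDyA idx).getD 0
  pvStepA park n m dxv dyv p time.toNat p

def solution (park : List String) (routes : List String) : List Int :=
  let n : Int := park.length
  let m : Int := PySem.Str.len ((PySem.List.pyGet? park 0).getD "")
  let p := routes.foldl (pvRouteA park n m) (pvFindSA park 0)
  [p.1, p.2]

-- ===== PORT B =====
def pvDirB (d : String) : Int × Int :=
  (PySem.Dict.get?
    (PySem.Dict.ofList [("N", ((-1 : Int), (0 : Int))), ("S", (1, 0)), ("W", (0, -1)), ("E", (0, 1))])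
    d).getD (0, 0)

-- next(((i, j) for i, row in enumerate(park) for j, c in enumerate(row) if c == 'S'), (0, 0))
def pvStartB (park : List String) : Int × Int :=
  ((PySem.List.enumerate park).findSome? (fun ir =>
      (PySem.List.enumerate ir.2.toList).findSome? (fun jc =>
          if jc.2 = 'S' then some (ir.1, jc.1) else none))).getD (0, 0)

def pvRouteB (park : List String) (n m : Int) (p : Int × Int) (route : String) : Int × Int :=
  let parts := PySem.Str.split₀ route
  let d := pvDirB ((PySem.List.pyGet? parts 0).getD "")
  let t := (PySem.Int.ofStr? ((PySem.List.pyGet? parts 1).getD "")).getD 0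
  let ex := p.1 + d.1 * t
  let ey := p.2 + d.2 * t
  if 0 < t ∧ 0 ≤ ex ∧ ex < n ∧ 0 ≤ ey ∧ ey < m ∧
      (PySem.List.pyRange 1 (t + 1)).all
        (fun k => pvCell park (p.1 + d.1 * k) (p.2 + d.2 * k) != 'X') then
    (ex, ey)
  else p

def solution_alt (park : List String) (routes : List String) : List Int :=
  let n : Int := park.length
  let m : Int := PySem.Str.len ((PySem.List.pyGet? park 0).getD "")
  let p := routes.foldl (pvRouteB park n m) (pvStartB park)
  [p.1, p.2]

-- ===== PRECONDITION & SPEC =====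
-- Pre_ is the task's natural domain: a nonempty rectangular park and well-formed routes.
-- With no routes nothing is walked, so any nonempty park is admitted.  Otherwise it excludes
-- ragged parks (A sizes every row by the first one and raises IndexError whenever the
-- walk reaches a short row; where A happens to return, both programs agree) and malformed routes
-- (A raises IndexError/KeyError/ValueError as soon as it steps; B parses the direction before the
-- loop, so B raises on a bad direction even when the distance token makes A's loop empty).
def Pre_solution (park : List String) (routes : List String) : Prop :=
  park ≠ [] ∧
  (routes = [] ∨
   (∀ r ∈ park, PySem.Str.len r = PySem.Str.len (park.headD "")) ∧
   (∀ rt ∈ routes,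
    2 ≤ (PySem.Str.split₀ rt).length ∧
    (PySem.Str.split₀ rt).getD 0 "" ∈ (["N", "S", "W", "E"] : List String) ∧
    (PySem.Int.ofStr? ((PySem.Str.split₀ rt).getD 1 "")).isSome = true))
instance (park : List String) (routes : List String) : Decidable (Pre_solution park routes) := by
  unfold Pre_solution; infer_instance

def pvWitness_solution : List String × List String := (["SO", "OX"], ["E 1", "S 1"])

def Spec_solution (park : List String) (routes : List String) (out : List Int) : Prop :=
  out = solution_alt park routes
instance (park : List String) (routes : List String) (out : List Int) :
    Decidable (Spec_solution park routes out) := by unfold Spec_solution; infer_instance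

-- ===== CLAIM (what is proved, stated in full; the proofs are below) =====
def Claim_equal_solution : Prop := ∀ (park : List String) (routes : List String),
  Dom_solution park routes → Pre_solution park routes →
  Spec_solution park routes (solution park routes)

-- ===== LEMMAS AND PROOFS =====

-- current position is either in bounds or still the (0, 0) default
def pvInv (n m : Int) (p : Int × Int) : Prop :=
  (0 ≤ p.1 ∧ p.1 < n ∧ 0 ≤ p.2 ∧ p.2 < m) ∨ p = (0, 0)

lemma pvFindRowA_eq (i : Int) :
    ∀ (cs : List Char) (j : Int),
      (PySem.List.enumerate cs j).findSome?
          (fun jc => if jc.2 = 'S' then some (i, jc.1) else none) =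
        (pvFindRowA cs j).map (fun k => (i, k)) := by
  intro cs
  induction cs with
  | nil => intro j; simp [PySem.List.enumerate_nil, pvFindRowA]
  | cons c cs ih =>
    intro j
    rw [PySem.List.enumerate_cons, List.findSome?_cons]
    by_cases h : c = 'S' <;> simp [pvFindRowA, h, ih]

lemma pvStartB_eq :
    ∀ (ps : List String) (i : Int),
      pvFindSA ps i =
        ((PySem.List.enumerate ps i).findSome? (fun ir =>
            (PySem.List.enumerate ir.2.toList).findSome? (fun jc =>
                if jc.2 = 'S' then some (ir.1, jc.1) else none))).getD (0, 0) := by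
  intro ps
  induction ps with
  | nil => intro i; simp [PySem.List.enumerate_nil, pvFindSA]
  | cons r rest ih =>
    intro i
    rw [PySem.List.enumerate_cons, List.findSome?_cons]
    have h := pvFindRowA_eq i r.toList 0
    simp only [pvFindSA]
    cases hrow : pvFindRowA r.toList 0 with
    | some j => simp [h, hrow]
    | none => simp [h, hrow, ih]

lemma pvFindRowA_bounds :
    ∀ (cs : List Char) (j k : Int), pvFindRowA cs j = some k → j ≤ k ∧ k < j + cs.length := by
  intro cs
  induction cs with
  | nil => intro j k h; simp [pvFindRowA] at h
  | cons c cs ih =>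
    intro j k h
    simp only [pvFindRowA] at h
    split at h
    · cases h; constructor <;> simp
    · have := ih (j + 1) k h
      simp only [List.length_cons]
      push_cast
      omega

lemma pvFindSA_inv (m : Int) :
    ∀ (ps : List String) (i : Int), 0 ≤ i → (∀ r ∈ ps, PySem.Str.len r = m) →
      pvFindSA ps i = (0, 0) ∨
        (0 ≤ (pvFindSA ps i).1 ∧ (pvFindSA ps i).1 < i + ps.length ∧
         0 ≤ (pvFindSA ps i).2 ∧ (pvFindSA ps i).2 < m) := by
  intro ps
  induction ps with
  | nil => intro i _ _; left; simp [pvFindSA]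
  | cons r rest ih =>
    intro i hi hlen
    simp only [pvFindSA]
    cases hrow : pvFindRowA r.toList 0 with
    | some j =>
      right
      have hb := pvFindRowA_bounds r.toList 0 j hrow
      have hr : PySem.Str.len r = m := hlen r (by simp)
      have hlr : PySem.Str.len r = (r.toList.length : Int) := by simp [PySem.Str.len_eq]
      simp only [List.length_cons]
      push_cast
      refine ⟨by omega, by omega, by omega, by omega⟩
    | none =>
      have := ih (i + 1) (by omega) (fun r hr => hlen r (by simp [hr]))
      rcases this with h | h
      · left; exact h
      · right
        simp only [List.length_cons]
        push_cast
        exact ⟨h.1, by omega, h.2.2.1, h.2.2.2⟩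

def pvOk (park : List String) (n m a b : Int) : Bool :=
  decide (0 ≤ a) && decide (a < n) && decide (0 ≤ b) && decide (b < m) && (pvCell park a b != 'X')

lemma pvOk_iff (park : List String) (n m a b : Int) :
    pvOk park n m a b = true ↔ (0 ≤ a ∧ a < n ∧ 0 ≤ b ∧ b < m ∧ pvCell park a b ≠ 'X') := by
  simp [pvOk]; tauto

lemma pvStepA_char (park : List String) (n m dxv dyv : Int) (temp : Int × Int) :
    ∀ (k : Nat) (x y : Int),
      pvStepA park n m dxv dyv temp k (x, y) =
        if ∀ j < k, pvOk park n m (x + dxv * (j + 1)) (y + dyv * (j + 1)) = true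
        then (x + dxv * k, y + dyv * k) else temp := by
  intro k
  induction k with
  | zero =>
    intro x y
    rw [if_pos (by omega)]
    simp [pvStepA]
  | succ k ih =>
    intro x y
    have hc0 : (0 ≤ x + dxv ∧ x + dxv < n ∧ 0 ≤ y + dyv ∧ y + dyv < m ∧
        pvCell park (x + dxv) (y + dyv) ≠ 'X') ↔
        pvOk park n m (x + dxv * (0 + 1)) (y + dyv * (0 + 1)) = true := by
      simp [pvOk]; tauto
    by_cases h0 : pvOk park n m (x + dxv * ((0 : Nat) + 1)) (y + dyv * ((0 : Nat) + 1)) = true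
    · rw [pvStepA, if_pos (hc0.mpr h0), ih]
      have harg : ∀ j : Nat, (x + dxv + dxv * (j + 1) = x + dxv * ((j + 1 : Nat) + 1)) ∧
          (y + dyv + dyv * (j + 1) = y + dyv * ((j + 1 : Nat) + 1)) := by
        intro j; constructor <;> push_cast <;> ring
      have hiff : (∀ j < k, pvOk park n m (x + dxv + dxv * (j + 1)) (y + dyv + dyv * (j + 1)) = true)
          ↔ (∀ j < k + 1, pvOk park n m (x + dxv * (j + 1)) (y + dyv * (j + 1)) = true) := by
        constructor
        · intro h j hj
          match j with
          | 0 => exact h0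
          | j + 1 =>
            have := h j (by omega)
            rwa [(harg j).1, (harg j).2] at this
        · intro h j hj
          have := h (j + 1) (by omega)
          rwa [← (harg j).1, ← (harg j).2] at this
      rw [if_congr hiff rfl rfl]
      have e1 : x + dxv + dxv * k = x + dxv * (k + 1 : Nat) := by push_cast; ring
      have e2 : y + dyv + dyv * k = y + dyv * (k + 1 : Nat) := by push_cast; ring
      rw [e1, e2]
    · rw [pvStepA, if_neg (fun hc => h0 (hc0.mp hc))]
      rw [if_neg (fun hall => h0 (hall 0 (by omega)))]

lemma pvMono (dxv dyv n m x y t s : Int)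
    (hd : (dxv, dyv) = (-1, 0) ∨ (dxv, dyv) = (1, 0) ∨ (dxv, dyv) = (0, -1) ∨ (dxv, dyv) = (0, 1))
    (h0 : 0 ≤ x ∧ x < n ∧ 0 ≤ y ∧ y < m)
    (hend : 0 ≤ x + dxv * t ∧ x + dxv * t < n ∧ 0 ≤ y + dyv * t ∧ y + dyv * t < m)
    (hs1 : 1 ≤ s) (hs2 : s ≤ t) :
    0 ≤ x + dxv * s ∧ x + dxv * s < n ∧ 0 ≤ y + dyv * s ∧ y + dyv * s < m := by
  rcases hd with h | h | h | h <;>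
    (rw [Prod.mk.injEq] at h; obtain ⟨h1, h2⟩ := h; subst h1; subst h2) <;> omega

lemma pvCore (park : List String) (n m dxv dyv : Int)
    (hd : (dxv, dyv) = (-1, 0) ∨ (dxv, dyv) = (1, 0) ∨ (dxv, dyv) = (0, -1) ∨ (dxv, dyv) = (0, 1))
    (p : Int × Int) (hInv : pvInv n m p) (t : Int) :
    pvStepA park n m dxv dyv p t.toNat p =
      if 0 < t ∧ 0 ≤ p.1 + dxv * t ∧ p.1 + dxv * t < n ∧ 0 ≤ p.2 + dyv * t ∧ p.2 + dyv * t < m ∧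
          (PySem.List.pyRange 1 (t + 1)).all
            (fun k => pvCell park (p.1 + dxv * k) (p.2 + dyv * k) != 'X')
      then (p.1 + dxv * t, p.2 + dyv * t) else p := by
  obtain ⟨x, y⟩ := p
  rw [pvStepA_char]
  simp only []
  have hall : (PySem.List.pyRange 1 (t + 1)).all
      (fun k => pvCell park (x + dxv * k) (y + dyv * k) != 'X') = true ↔
      ∀ k : Int, 1 ≤ k → k ≤ t → pvCell park (x + dxv * k) (y + dyv * k) ≠ 'X' := by
    rw [List.all_eq_true]
    constructor
    · intro h k hk1 hk2
      have := h k (PySem.List.mem_pyRange_one.mpr ⟨hk1, by omega⟩)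
      simpa using this
    · intro h k hk
      have hk' := PySem.List.mem_pyRange_one.mp hk
      simpa using h k hk'.1 (by omega)
  by_cases ht : 0 < t
  · by_cases hok : 0 ≤ x ∧ x < n ∧ 0 ≤ y ∧ y < m
    · -- in-bounds start: the step-by-step condition equals the batch condition
      have hiff : (∀ j < t.toNat, pvOk park n m (x + dxv * (j + 1)) (y + dyv * (j + 1)) = true) ↔
          (0 < t ∧ 0 ≤ x + dxv * t ∧ x + dxv * t < n ∧ 0 ≤ y + dyv * t ∧ y + dyv * t < m ∧
            (PySem.List.pyRange 1 (t + 1)).all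
              (fun k => pvCell park (x + dxv * k) (y + dyv * k) != 'X') = true) := by
        rw [hall]
        constructor
        · intro h
          have hTend := h (t.toNat - 1) (by omega)
          rw [pvOk_iff] at hTend
          have hcast : ((t.toNat - 1 : Nat) : Int) + 1 = t := by omega
          rw [hcast] at hTend
          refine ⟨ht, hTend.1, hTend.2.1, hTend.2.2.1, hTend.2.2.2.1, ?_⟩
          intro k hk1 hk2
          have := h (k - 1).toNat (by omega)
          rw [pvOk_iff] at this
          have hcast2 : (((k - 1).toNat : Nat) : Int) + 1 = k := by omega
          rw [hcast2] at this
          exact this.2.2.2.2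
        · rintro ⟨-, he1, he2, he3, he4, hcells⟩ j hj
          rw [pvOk_iff]
          have hb := pvMono dxv dyv n m x y t (j + 1) hd hok ⟨he1, he2, he3, he4⟩
            (by omega) (by omega)
          exact ⟨hb.1, hb.2.1, hb.2.2.1, hb.2.2.2, hcells (j + 1) (by omega) (by omega)⟩
      by_cases hA : ∀ j < t.toNat, pvOk park n m (x + dxv * (j + 1)) (y + dyv * (j + 1)) = true
      · rw [if_pos hA]
        have hB := hiff.mp hA
        rw [if_pos ⟨hB.1, hB.2.1, hB.2.2.1, hB.2.2.2.1, hB.2.2.2.2.1, hB.2.2.2.2.2⟩]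
        have : ((t.toNat : Nat) : Int) = t := by omega
        rw [this]
      · rw [if_neg hA, if_neg (fun hB => hA (hiff.mpr ⟨hB.1, hB.2.1, hB.2.2.1, hB.2.2.2.1,
          hB.2.2.2.2.1, hB.2.2.2.2.2⟩))]
    · -- start is the (0, 0) default and the grid has an empty dimension: nobody moves
      have hp : x = 0 ∧ y = 0 := by
        rcases hInv with h | h
        · exact absurd h hok
        · simpa [Prod.mk.injEq] using h
      obtain ⟨hx0, hy0⟩ := hp; subst hx0; subst hy0
      have hnm : n ≤ 0 ∨ m ≤ 0 := by omega
      rw [if_neg, if_neg]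
      · rintro ⟨-, h1, h2, h3, h4, -⟩; omega
      · intro h
        have := h 0 (by omega)
        rw [pvOk_iff] at this
        omega
  · -- non-positive time: zero fuel on the left, a failed 0 < t on the right
    have h0 : t.toNat = 0 := by omega
    rw [h0, if_pos (by omega), if_neg (by tauto)]
    norm_num

lemma pvRoute_eq (park : List String) (n m : Int) (p : Int × Int) (rt : String)
    (hInv : pvInv n m p)
    (hrt : 2 ≤ (PySem.Str.split₀ rt).length ∧
      (PySem.Str.split₀ rt).getD 0 "" ∈ (["N", "S", "W", "E"] : List String) ∧
      (PySem.Int.ofStr? ((PySem.Str.split₀ rt).getD 1 "")).isSome = true) :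
    pvRouteA park n m p rt = pvRouteB park n m p rt ∧ pvInv n m (pvRouteA park n m p rt) := by
  obtain ⟨hlen, hdir, -⟩ := hrt
  match hparts : PySem.Str.split₀ rt with
  | [] => rw [hparts] at hlen; simp at hlen
  | [d] => rw [hparts] at hlen; simp at hlen
  | d :: s :: rest =>
    rw [hparts] at hdir
    simp only [List.getD_cons_zero] at hdir
    have hg0 : (PySem.List.pyGet? (d :: s :: rest) (0 : Int)).getD "" = d := by simp [pysem]
    have hg1 : (PySem.List.pyGet? (d :: s :: rest) (1 : Int)).getD "" = s := by simp [pysem]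
    have main : ∀ dxv dyv : Int,
        (dxv, dyv) = (-1, 0) ∨ (dxv, dyv) = (1, 0) ∨ (dxv, dyv) = (0, -1) ∨ (dxv, dyv) = (0, 1) →
        (PySem.List.pyGet? pvDxA ((PySem.Dict.get? pvMoveD d).getD 0)).getD 0 = dxv →
        (PySem.List.pyGet? pvDyA ((PySem.Dict.get? pvMoveD d).getD 0)).getD 0 = dyv →
        pvDirB d = (dxv, dyv) →
        pvRouteA park n m p rt = pvRouteB park n m p rt ∧
          pvInv n m (pvRouteA park n m p rt) := by
      intro dxv dyv hd hx hy hb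
      have hA : pvRouteA park n m p rt =
          pvStepA park n m dxv dyv p ((PySem.Int.ofStr? s).getD 0).toNat p := by
        simp only [pvRouteA, hparts, hg0, hg1, hx, hy]
      have hB : pvRouteB park n m p rt =
          (if 0 < (PySem.Int.ofStr? s).getD 0 ∧
              0 ≤ p.1 + dxv * (PySem.Int.ofStr? s).getD 0 ∧
              p.1 + dxv * (PySem.Int.ofStr? s).getD 0 < n ∧
              0 ≤ p.2 + dyv * (PySem.Int.ofStr? s).getD 0 ∧
              p.2 + dyv * (PySem.Int.ofStr? s).getD 0 < m ∧
              (PySem.List.pyRange 1 ((PySem.Int.ofStr? s).getD 0 + 1)).all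
                (fun k => pvCell park (p.1 + dxv * k) (p.2 + dyv * k) != 'X')
            then (p.1 + dxv * (PySem.Int.ofStr? s).getD 0,
                  p.2 + dyv * (PySem.Int.ofStr? s).getD 0)
            else p) := by
        simp only [pvRouteB, hparts, hg0, hg1, hb]
      have hcore := pvCore park n m dxv dyv hd p hInv ((PySem.Int.ofStr? s).getD 0)
      refine ⟨by rw [hA, hB, hcore], ?_⟩
      rw [hA, hcore]
      split_ifs with h
      · exact Or.inl ⟨h.2.1, h.2.2.1, h.2.2.2.1, h.2.2.2.2.1⟩
      · exact hInv
    simp only [List.mem_cons, List.not_mem_nil, or_false] at hdir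
    rcases hdir with rfl | rfl | rfl | rfl
    · exact main (-1) 0 (Or.inl rfl) (by decide) (by decide) (by decide)
    · exact main 1 0 (Or.inr (Or.inl rfl)) (by decide) (by decide) (by decide)
    · exact main 0 (-1) (Or.inr (Or.inr (Or.inl rfl))) (by decide) (by decide) (by decide)
    · exact main 0 1 (Or.inr (Or.inr (Or.inr rfl))) (by decide) (by decide) (by decide)

lemma pvFold_eq (park : List String) (n m : Int) :
    ∀ (rts : List String) (p : Int × Int), pvInv n m p →
      (∀ rt ∈ rts,
        2 ≤ (PySem.Str.split₀ rt).length ∧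
        (PySem.Str.split₀ rt).getD 0 "" ∈ (["N", "S", "W", "E"] : List String) ∧
        (PySem.Int.ofStr? ((PySem.Str.split₀ rt).getD 1 "")).isSome = true) →
      rts.foldl (pvRouteA park n m) p = rts.foldl (pvRouteB park n m) p := by
  intro rts
  induction rts with
  | nil => intro p _ _; simp [List.foldl_nil]
  | cons rt rts ih =>
    intro p hInv hok
    have h := pvRoute_eq park n m p rt hInv (hok rt (List.mem_cons_self ..))
    rw [List.foldl_cons, List.foldl_cons]
    have h2 := ih (pvRouteA park n m p rt) h.2 (fun r hr => hok r (List.mem_cons_of_mem _ hr))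
    rw [h2, h.1]

-- ===== VERDICT (by name: the statement is the Claim_ definition above) =====
theorem solution_spec : Claim_equal_solution := by
  intro park routes _ hpre
  obtain ⟨hne, hrest⟩ := hpre
  show solution park routes = solution_alt park routes
  match park with
  | [] => exact absurd rfl hne
  | r0 :: prest =>
    rcases hrest with rfl | ⟨hrect, hroutes⟩
    · simp only [solution, solution_alt, List.foldl_nil]
      rw [pvStartB_eq (r0 :: prest) 0]
      rfl
    simp only [solution, solution_alt]
    have hget0 : (PySem.List.pyGet? (r0 :: prest) (0 : Int)).getD "" = r0 := by simp [pysem]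
    rw [hget0]
    have hstart : pvFindSA (r0 :: prest) 0 = pvStartB (r0 :: prest) := by
      rw [pvStartB_eq]; rfl
    have hinv : pvInv ((r0 :: prest).length : Int) (PySem.Str.len r0) (pvFindSA (r0 :: prest) 0) := by
      have := pvFindSA_inv (PySem.Str.len r0) (r0 :: prest) 0 (by omega)
        (by intro r hr; simpa using hrect r hr)
      rcases this with h | h
      · right; exact h
      · left; exact ⟨h.1, by simpa using h.2.1, h.2.2.1, h.2.2.2⟩
    rw [← hstart]
    rw [pvFold_eq (r0 :: prest) ((r0 :: prest).length : Int) (PySem.Str.len r0) routes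
      (pvFindSA (r0 :: prest) 0) hinv hroutes]
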